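-- pv_equiv track=rewrite | github.com/Malachy-John/mooc.fl_python_2022 | part04-11_first_second_last/src/first_second_last.py | second_word
-- ===== SOURCE A (Python) =====
-- def second_word(sentence):
--     index = 0
--     while index < 1:
--         space = sentence.find(" ")
--         sentence = sentence[space+1:]
--         index +=1
--     if " " in sentence:
--         sentence = sentence[:sentence.find(" ")]
--     else:
--         sentence = sentence
--     return sentence
-- ===== SOURCE B (Python) =====
-- def second_word(sentence):
--     parts = sentence.split(" ")
--     return parts[1] if len(parts) > 1 else parts[0]
-- ===== Notes on version B (the rewrite author's own statement) =====
-- stated objective: idiomatic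
-- what changed: Replaces A's one-shot while loop of find/slice surgery with a single split on the space character into a list indexed at position 1 (falling back to the first part when the sentence has no space).
import Mathlib
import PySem

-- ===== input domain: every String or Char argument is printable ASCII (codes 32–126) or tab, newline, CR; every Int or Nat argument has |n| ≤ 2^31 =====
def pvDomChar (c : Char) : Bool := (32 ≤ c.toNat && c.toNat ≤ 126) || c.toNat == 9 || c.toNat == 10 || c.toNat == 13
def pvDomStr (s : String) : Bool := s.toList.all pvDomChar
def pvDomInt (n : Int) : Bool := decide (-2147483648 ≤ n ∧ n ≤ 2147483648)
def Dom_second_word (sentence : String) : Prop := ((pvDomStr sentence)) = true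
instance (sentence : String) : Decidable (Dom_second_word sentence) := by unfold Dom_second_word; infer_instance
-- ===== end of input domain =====

-- B replaces A's while-loop of find/slice surgery with a single split on the space
-- character, indexed at position 1 (parts[0] when there is no space): idiomatic, same cost.

-- ===== PORT A =====
-- the 'while index < 1' loop of A, step for step (it strips everything up to and
-- including the first space; find returns -1 when there is no space, so the slice
-- then starts at 0 and keeps the whole string)
def second_word_loop (sentence : String) (index : Int) : String :=
  if _h : index < 1 then
    second_word_loop
      (PySem.Str.slice sentence (some (PySem.Str.find sentence " " + 1)) none)
      (index + 1)
  else sentence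
termination_by (1 - index).toNat
decreasing_by omega

def second_word (sentence : String) : String :=
  let sentence := second_word_loop sentence 0
  if PySem.Str.isIn " " sentence then
    PySem.Str.slice sentence none (some (PySem.Str.find sentence " "))
  else sentence

-- ===== PORT B =====
def second_word_alt (sentence : String) : String :=
  match PySem.Str.split? sentence " " with
  | none => ""          -- unreachable: the separator " " is not empty
  | some parts => if 1 < parts.length then parts.getD 1 "" else parts.getD 0 ""

-- ===== PRECONDITION & SPEC =====
def Spec_second_word (sentence : String) (out : String) : Prop := out = second_word_alt sentence
instance (sentence : String) (out : String) : Decidable (Spec_second_word sentence out) := by unfold Spec_second_word; infer_instance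

-- ===== CLAIM (what is proved, stated in full; the proofs are below) =====
def Claim_equal_second_word : Prop := ∀ (sentence : String), Dom_second_word sentence → Spec_second_word sentence (second_word sentence)

-- ===== LEMMAS AND PROOFS =====

-- the chunks of a char list between single-space separators (pure structural form
-- of Python's split(" "))
def swChunks : List Char → List (List Char)
  | [] => [[]]
  | c :: rest => if c = ' ' then [] :: swChunks rest
                 else (swChunks rest).modifyHead (c :: ·)

theorem swChunks_ne_nil (l : List Char) : swChunks l ≠ [] := by
  cases l with
  | nil => simp [swChunks]
  | cons c rest =>
      simp only [swChunks]
      split <;> simp [List.modifyHead_eq_nil_iff, swChunks_ne_nil rest]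

theorem swChunks_no_space (l : List Char) (h : ' ' ∉ l) : swChunks l = [l] := by
  induction l with
  | nil => rfl
  | cons c rest ih =>
      simp only [List.mem_cons, not_or] at h
      simp [swChunks, Ne.symm h.1, ih h.2]

theorem swChunks_append (a r : List Char) (h : ' ' ∉ a) :
    swChunks (a ++ ' ' :: r) = a :: swChunks r := by
  induction a with
  | nil => simp [swChunks]
  | cons c a' ih =>
      simp only [List.mem_cons, not_or] at h
      simp [swChunks, Ne.symm h.1, ih h.2]

theorem swGo_chunks (fuel : Nat) (l cur : List Char) (acc : List (List Char)) (hf : l.length < fuel) :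
    PySem.Chars.splitOn.go [' '] fuel l cur acc
      = acc.reverse ++ (swChunks l).modifyHead (cur.reverse ++ ·) := by
  induction fuel generalizing l cur acc with
  | zero => omega
  | succ fuel ih =>
      cases l with
      | nil => simp [PySem.Chars.splitOn.go, swChunks]
      | cons c rest =>
          by_cases hc : c = ' '
          · subst hc
            rw [PySem.Chars.splitOn.go]
            simp only [List.isPrefixOf, BEq.rfl, Bool.true_and, if_pos]
            rw [show List.drop [' '].length (' ' :: rest) = rest from rfl,
              ih rest [] _ (by simpa using Nat.lt_of_succ_lt_succ hf)]
            simp only [swChunks, List.reverse_cons, List.append_assoc,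
              List.singleton_append]
            cases swChunks rest <;> simp
          · rw [PySem.Chars.splitOn.go]
            have hpre : [' '].isPrefixOf (c :: rest) = false := by
              simp [List.isPrefixOf, Ne.symm hc]
            simp only [hpre, if_neg, Bool.false_eq_true, not_false_iff]
            rw [ih rest (c :: cur) acc (by simpa using Nat.lt_of_succ_lt_succ hf)]
            obtain ⟨k, ks, hk⟩ : ∃ k ks, swChunks rest = k :: ks := by
              cases h : swChunks rest with
              | nil => exact absurd h (swChunks_ne_nil rest)
              | cons k ks => exact ⟨k, ks, rfl⟩
            simp [swChunks, hc, hk]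

theorem swSplitOn_eq_chunks (l : List Char) :
    PySem.Chars.splitOn l [' '] = swChunks l := by
  rw [PySem.Chars.splitOn, swGo_chunks (l.length + 1) l [] [] (by omega)]
  cases h : swChunks l with
  | nil => exact absurd h (swChunks_ne_nil l)
  | cons k ks => simp

theorem swFind_no_space (l : List Char) (h : ' ' ∉ l) :
    PySem.Chars.find l [' '] = -1 := by
  rw [PySem.Chars.find_eq_neg_one_iff, List.singleton_infix_iff]
  exact h

theorem swFind_append (a r : List Char) (h : ' ' ∉ a) :
    PySem.Chars.find (a ++ ' ' :: r) [' '] = (a.length : Int) := by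
  have hinf : [' '] <:+: (a ++ ' ' :: r) := by
    rw [List.singleton_infix_iff]; simp
  have hpos : 0 ≤ PySem.Chars.find (a ++ ' ' :: r) [' '] :=
    (PySem.Chars.find_nonneg_iff _ _).mpr hinf
  obtain ⟨hpre, hmin⟩ := PySem.Chars.find_spec hpos
  set n := (PySem.Chars.find (a ++ ' ' :: r) [' ']).toNat with hn
  have hle : n ≤ a.length := by
    by_contra hgt
    exact hmin a.length (by omega) ⟨r, by simp⟩
  have hge : a.length ≤ n := by
    by_contra hcon
    have hlt : n < a.length := by omega
    obtain ⟨t, ht⟩ := hpre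
    have h2 : (a ++ ' ' :: r)[n]? = some ' ' := by
      have := congrArg (fun l => l.head?) ht
      simpa [List.head?_drop] using this.symm
    rw [List.getElem?_eq_some_iff] at h2
    obtain ⟨hlen, h3⟩ := h2
    rw [List.getElem_append_left hlt] at h3
    exact h (h3 ▸ a.getElem_mem _)
  have : n = a.length := le_antisymm hle hge
  omega

-- the first element surviving dropWhile falsifies the predicate
theorem swDropWhile_head {p : Char → Bool} {l dt : List Char} {d : Char}
    (h : l.dropWhile p = d :: dt) : p d = false := by
  induction l with
  | nil => simp at h
  | cons c rest ih =>
      rw [List.dropWhile_cons] at h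
      split at h
      · exact ih h
      · cases h
        simpa using ‹¬p d = true›

-- a char list containing a space splits as space-free prefix ++ ' ' :: rest
theorem swDecomp {r : List Char} (hin : ' ' ∈ r) :
    ∃ a dt, r = a ++ ' ' :: dt ∧ ' ' ∉ a := by
  set a := r.takeWhile (· ≠ ' ') with ha
  have hna : ' ' ∉ a := by
    intro hmem
    simpa using List.mem_takeWhile_imp hmem
  cases hD : r.dropWhile (· ≠ ' ') with
  | nil =>
      exfalso
      have hta := List.takeWhile_append_dropWhile (p := (· ≠ ' ')) (l := r)
      rw [hD, List.append_nil] at hta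
      rw [ha, hta] at hna
      exact hna hin
  | cons d dt =>
      have hd : d = ' ' := by simpa using swDropWhile_head hD
      refine ⟨a, dt, ?_, hna⟩
      conv_lhs => rw [← List.takeWhile_append_dropWhile (p := (· ≠ ' ')) (l := r)]
      rw [← ha, hD, hd]

-- stage 2 of A (cut at the first space) computes the head of the chunk list
theorem swStage2 (r : List Char) :
    (if PySem.Chars.isIn [' '] r then
        PySem.List.slice r none (some (PySem.Chars.find r [' ']))
      else r) = (swChunks r).headD [] := by
  by_cases hin : ' ' ∈ r
  · have hIn : PySem.Chars.isIn [' '] r = true := by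
      rw [PySem.Chars.isIn_iff_infix, List.singleton_infix_iff]; exact hin
    obtain ⟨a, dt, hr, hna⟩ := swDecomp hin
    rw [hIn]
    simp only [if_pos]
    rw [hr, swFind_append _ _ hna, swChunks_append _ _ hna,
      PySem.List.slice_to_natCast, List.take_left]
    rfl
  · have hIn : PySem.Chars.isIn [' '] r = false := by
      rw [PySem.Chars.isIn_eq_false_iff, List.singleton_infix_iff]; exact hin
    rw [hIn, swChunks_no_space r hin]
    rfl

-- ===== VERDICT (by name: the statement is the Claim_ definition above) =====
-- the loop runs exactly once: two unfoldings of second_word_loop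
theorem swLoop_eq (s : String) :
    second_word_loop s 0
      = PySem.Str.slice s (some (PySem.Str.find s " " + 1)) none := by
  rw [second_word_loop, dif_pos (show (0:Int) < 1 by norm_num), second_word_loop,
    dif_neg (show ¬((0:Int) + 1 < 1) by norm_num)]

theorem second_word_spec : Claim_equal_second_word := by
  intro s _
  unfold Spec_second_word second_word second_word_alt
  rw [swLoop_eq]
  set t := PySem.Str.slice s (some (PySem.Str.find s " " + 1)) none with htdef
  have hA : (if PySem.Str.isIn " " t then
      PySem.Str.slice t none (some (PySem.Str.find t " ")) else t).toList
      = (swChunks t.toList).headD [] := by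
    rw [apply_ite String.toList, PySem.Str.toList_slice, PySem.Str.find_eq,
      PySem.Str.isIn_eq]
    exact swStage2 t.toList
  have h : Option.map (List.map String.toList) (PySem.Str.split? s " ")
      = some (swChunks s.toList) := by
    rw [PySem.Str.split?_map, show (" " : String).toList = [' '] from by decide,
      PySem.Chars.split?, if_neg (by simp), swSplitOn_eq_chunks]
  obtain ⟨parts, hparts, hmap⟩ : ∃ parts, PySem.Str.split? s " " = some parts ∧
      parts.map String.toList = swChunks s.toList := by
    cases hsp : PySem.Str.split? s " " with
    | none => rw [hsp] at h; simp at h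
    | some parts =>
        rw [hsp, Option.map_some] at h
        exact ⟨parts, rfl, Option.some.inj h⟩
  rw [hparts]
  show _ = (if 1 < parts.length then parts.getD 1 "" else parts.getD 0 "")
  refine String.toList_inj.mp ?_
  rw [hA]
  by_cases hmem : ' ' ∈ s.toList
  · -- there is a space: the loop strips through it, split has at least two parts
    obtain ⟨a, r, hsr, hna⟩ := swDecomp hmem
    have hfind : PySem.Str.find s " " = (a.length : Int) := by
      rw [PySem.Str.find_eq, show (" " : String).toList = [' '] from by decide,
        hsr, swFind_append _ _ hna]
    have ht : t.toList = r := by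
      rw [htdef, PySem.Str.toList_slice, PySem.Chars.slice_eq_listSlice, hfind,
        show (a.length : Int) + 1 = ((a.length + 1 : Nat) : Int) by push_cast; ring,
        PySem.List.slice_from_natCast, hsr,
        show a ++ ' ' :: r = (a ++ [' ']) ++ r by simp,
        show a.length + 1 = (a ++ [' ']).length by simp,
        List.drop_left]
    rw [hsr, swChunks_append _ _ hna] at hmap
    obtain ⟨k, ks, hk⟩ : ∃ k ks, swChunks r = k :: ks := by
      cases h' : swChunks r with
      | nil => exact absurd h' (swChunks_ne_nil r)
      | cons k ks => exact ⟨k, ks, rfl⟩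
    rw [hk] at hmap
    obtain ⟨p0, p1, ps, hp⟩ : ∃ p0 p1 ps, parts = p0 :: p1 :: ps := by
      cases parts with
      | nil => simp at hmap
      | cons p0 rest =>
          cases rest with
          | nil => simp at hmap
          | cons p1 ps => exact ⟨p0, p1, ps, rfl⟩
    subst hp
    simp only [List.map_cons, List.cons.injEq] at hmap
    rw [if_pos (by simp)]
    rw [ht, hk]
    exact hmap.2.1.symm
  · -- no space: the loop keeps the whole string, split has exactly one part
    have hfind : PySem.Str.find s " " = -1 := by
      rw [PySem.Str.find_eq, show (" " : String).toList = [' '] from by decide,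
        swFind_no_space _ hmem]
    have ht : t.toList = s.toList := by
      rw [htdef, PySem.Str.toList_slice, PySem.Chars.slice_eq_listSlice, hfind,
        show (-1 : Int) + 1 = ((0 : Nat) : Int) by norm_num,
        PySem.List.slice_from_natCast, List.drop_zero]
    rw [swChunks_no_space _ hmem] at hmap
    obtain ⟨p0, hp⟩ : ∃ p0, parts = [p0] := by
      cases parts with
      | nil => simp at hmap
      | cons p0 rest =>
          cases rest with
          | nil => exact ⟨p0, rfl⟩
          | cons p1 ps => simp at hmap
    subst hp
    simp only [List.map_cons, List.map_nil, List.cons.injEq] at hmap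
    rw [if_neg (by simp), ht, swChunks_no_space _ hmem]
    exact hmap.1.symm
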